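-- pv_equiv track=rewrite | github.com/pgrady1322/splicetarget | splicetarget/therapeutic/aso_design.py | _max_self_comp
-- ===== SOURCE A (Python) =====
-- _COMPLEMENT = str.maketrans("ACGT", "TGCA")
--
-- def _reverse_complement(seq: str) -> str:
--     """Reverse complement a DNA sequence."""
--     return seq.translate(_COMPLEMENT)[::-1]
--
-- def _max_self_comp(seq: str) -> int:
--     """
--     Compute maximum self-complementarity length.
--
--     Finds the longest stretch where the ASO can fold back on itself
--     (form a hairpin). Simple sliding window approach.
--     """
--     rc = _reverse_complement(seq)
--     max_match = 0
--
--     for offset in range(1, len(seq)):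
--         match_len = 0
--         for i in range(len(seq) - offset):
--             if i + offset < len(rc) and seq[i] == rc[i + offset]:
--                 match_len += 1
--                 max_match = max(max_match, match_len)
--             else:
--                 match_len = 0
--
--     return max_match
-- ===== SOURCE B (Python) =====
-- def _max_self_comp(seq: str) -> int:
--     """Longest hairpin run via longest-common-substring dynamic programming.
--
--     A cell (i, j) with j > i matches when seq[i] == rc[j]; the longest run of
--     A is the longest diagonal streak of matching cells.  Instead of scanning
--     each diagonal separately, we sweep the match matrix row by row keeping a
--     1-D DP array: dp[j] = length of the matching streak ending at (i, j),
--     computed from the previous row's dp[j-1] (classic longest-common-substring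
--     recurrence), restricted to the strict upper triangle j > i.
--     """
--     comp = {"A": "T", "C": "G", "G": "C", "T": "A"}
--     rc = [comp.get(c, c) for c in reversed(seq)]
--     n = len(seq)
--     dp = [0] * n
--     best = 0
--     for i in range(n):
--         ch = seq[i]
--         dp = [0] * (i + 1) + [dp[j - 1] + 1 if ch == rc[j] else 0
--                               for j in range(i + 1, n)]
--         if dp:
--             best = max(best, max(dp))
--     return best
-- ===== Notes on version B (the rewrite author's own statement) =====
-- stated objective: alternative
-- what changed: B replaces A's per-offset run scan against the reverse complement with the classic longest-common-substring dynamic programming: it sweeps the seq-vs-rc match matrix row by row, maintaining a 1-D dp array where dp[j] = dp_prev[j-1]+1 on a match (restricted to the upper triangle j > i), instead of walking each diagonal and counting streaks.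
import Mathlib
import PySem

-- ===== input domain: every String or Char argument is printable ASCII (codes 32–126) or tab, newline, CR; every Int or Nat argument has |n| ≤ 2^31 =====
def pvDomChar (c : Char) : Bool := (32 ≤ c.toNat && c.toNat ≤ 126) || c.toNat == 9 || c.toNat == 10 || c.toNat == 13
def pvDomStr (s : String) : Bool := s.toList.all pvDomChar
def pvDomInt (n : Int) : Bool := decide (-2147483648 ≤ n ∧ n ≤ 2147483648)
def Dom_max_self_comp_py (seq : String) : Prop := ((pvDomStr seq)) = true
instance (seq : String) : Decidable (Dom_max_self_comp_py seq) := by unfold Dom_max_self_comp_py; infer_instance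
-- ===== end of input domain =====

-- B replaces A's per-offset run scan against the reverse complement with a row-major
-- longest-common-substring DP over the match matrix (1-D dp row); same result, proved below.

-- ===== PORT A =====
-- str.translate("ACGT"→"TGCA") ported by hand (exact: maps those four chars, leaves every
-- other char unchanged); [::-1] is List.reverse.
def pvRcCh (c : Char) : Char :=
  if c = 'A' then 'T' else if c = 'C' then 'G' else if c = 'G' then 'C' else if c = 'T' then 'A' else c

def pvRevComp (cs : List Char) : List Char := (cs.map pvRcCh).reverse

def max_self_comp_py (seq : String) : Int :=
  let cs := seq.toList
  let rc := pvRevComp cs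
  let n : Int := cs.length
  (PySem.List.pyRange 1 n 1).foldl (fun mm offset =>
    ((PySem.List.pyRange 0 (n - offset) 1).foldl (fun (st : Int × Int) i =>
      if i + offset < (rc.length : Int) ∧
          PySem.List.pyGet? cs i = PySem.List.pyGet? rc (i + offset) then
        (st.1 + 1, max st.2 (st.1 + 1))
      else (0, st.2)) (0, mm)).2) 0

-- ===== PORT B =====
def pvCompD : PySem.Dict Char Char :=
  PySem.Dict.ofList [('A', 'T'), ('C', 'G'), ('G', 'C'), ('T', 'A')]

-- dp[j-1] is always in range where it is read (i+1 ≤ j < n), so the total pyGetD is exact;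
-- seq[i] == rc[j] is compared as the (always-some) Option values, exact for in-range indices.
def max_self_comp_py_alt (seq : String) : Int :=
  let cs := seq.toList
  let rc := cs.reverse.map (fun c => pvCompD.getD c c)
  let n : Int := cs.length
  (((PySem.List.pyRange 0 n 1).foldl (fun (st : List Int × Int) i =>
      let ch := PySem.List.pyGet? cs i
      let dp := List.replicate (i + 1).toNat (0 : Int) ++
        (PySem.List.pyRange (i + 1) n 1).map (fun j =>
          if ch = PySem.List.pyGet? rc j then PySem.List.pyGetD st.1 (j - 1) 0 + 1 else 0)
      let best := match PySem.List.max? dp (fun y => y) with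
        | some m => max st.2 m
        | none => st.2
      (dp, best)) (List.replicate n.toNat (0 : Int), 0))).2

-- ===== PRECONDITION & SPEC =====
def Spec_max_self_comp_py (seq : String) (out : Int) : Prop := out = max_self_comp_py_alt seq
instance (seq : String) (out : Int) : Decidable (Spec_max_self_comp_py seq out) := by unfold Spec_max_self_comp_py; infer_instance

-- ===== CLAIM (what is proved, stated in full; the proofs are below) =====
def Claim_equal_max_self_comp_py : Prop := ∀ (seq : String), Dom_max_self_comp_py seq → Spec_max_self_comp_py seq (max_self_comp_py seq)

-- ===== LEMMAS AND PROOFS =====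

-- match test of cell (i, i+o): seq[i] against rc[i+o], as plain Nat indices
def pvCond (cs : List Char) (o i : ℕ) : Bool := decide (cs[i]? = (pvRevComp cs)[i + o]?)

-- run length ending at index i along diagonal o (Nat-valued)
def pvRun (cs : List Char) (o : ℕ) : ℕ → ℕ
  | 0 => if pvCond cs o 0 then 1 else 0
  | i + 1 => if pvCond cs o (i + 1) then pvRun cs o i + 1 else 0

-- max over a diagonal / over a row of the triangle
def pvDiagSup (cs : List Char) (o : ℕ) : ℕ :=
  (Finset.range (cs.length - o)).sup (pvRun cs o)
def pvRowSup (cs : List Char) (i : ℕ) : ℕ :=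
  (Finset.range (cs.length - 1 - i)).sup (fun t => pvRun cs (t + 1) i)

-- the run-counting inner loop of A, abstracted over the per-index test
def pvStep (c : Int → Bool) : Int × Int → Int → Int × Int :=
  fun st i => if c i then (st.1 + 1, max st.2 (st.1 + 1)) else (0, st.2)

def pvCA (cs : List Char) (o : Int) : Int → Bool := fun i =>
  decide (i + o < ((pvRevComp cs).length : Int) ∧
    PySem.List.pyGet? cs i = PySem.List.pyGet? (pvRevComp cs) (i + o))

theorem pvStep_shift (c : Int → Bool) (l : List Int) :
    ∀ r m : Int, 0 ≤ r → 0 ≤ m →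
      (l.foldl (pvStep c) (r, m)).2 = max m ((l.foldl (pvStep c) (r, 0)).2) := by
  induction l with
  | nil => intro r m _ hm; simp [max_eq_left hm]
  | cons a l ih =>
    intro r m hr hm
    by_cases h : c a
    · simp only [List.foldl_cons, pvStep, h, if_pos]
      rw [ih (r+1) (max m (r+1)) (by omega) (by omega),
          ih (r+1) (max 0 (r+1)) (by omega) (by omega)]
      have h1 : max (0:Int) (r+1) = r + 1 := by omega
      rw [h1, ← max_assoc]
    · simp only [List.foldl_cons, pvStep, h, if_neg, Bool.false_eq_true, not_false_iff]
      exact ih 0 m le_rfl hm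

-- outer loop: threading the accumulator through the inner loop equals accumulating with max
theorem pvOuter (inner : Int → Int → Int)
    (h : ∀ o m, 0 ≤ m → inner o m = max m (inner o 0)) (l : List Int) :
    ∀ m : Int, 0 ≤ m →
      l.foldl (fun mm o => inner o mm) m = l.foldl (fun mm o => max mm (inner o 0)) m := by
  induction l with
  | nil => intro m _; rfl
  | cons a l ih =>
    intro m hm
    simp only [List.foldl_cons]
    rw [h a m hm]
    exact ih _ (le_trans hm (le_max_left _ _))

-- the complement-dict lookup computes pvRcCh
theorem pvCompD_getD (c : Char) : pvCompD.getD c c = pvRcCh c := by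
  have h : pvCompD = PySem.Dict.mk [('A', 'T'), ('C', 'G'), ('G', 'C'), ('T', 'A')] := by decide
  rw [h, pvRcCh, PySem.Dict.getD_eq_get?_getD,
    PySem.Dict.get?_mk_cons, PySem.Dict.get?_mk_cons, PySem.Dict.get?_mk_cons, PySem.Dict.get?_mk_cons]
  simp only [beq_iff_eq]
  split_ifs with h1 h2 h3 h4 <;> simp_all [eq_comm, PySem.Dict.get?]

-- fold-max of casted Nat values is the Finset.sup
theorem pvFoldMaxCast (f : ℕ → ℕ) (m : ℕ) :
    ∀ b : Int, 0 ≤ b → (List.range m).foldl (fun a t => max a ((f t : ℕ) : Int)) b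
      = max b ((Finset.range m).sup f : ℕ) := by
  induction m with
  | zero => intro b hb; simp; omega
  | succ m ih =>
    intro b hb
    rw [List.range_succ, List.foldl_append, ih b hb,
      Finset.range_add_one, Finset.sup_insert]
    simp only [List.foldl_cons, List.foldl_nil]
    push_cast
    omega

-- A's inner fold over a prefix of a diagonal: first component = current run, second = sup so far
theorem pvInnerA (cs : List Char) (o m : ℕ) (h : m + o ≤ cs.length) :
    (PySem.List.pyRange 0 (m : Int) 1).foldl (pvStep (pvCA cs (o : Int))) (0, 0)
      = ((if m = 0 then 0 else (pvRun cs o (m - 1) : Int)),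
         (((Finset.range m).sup (pvRun cs o) : ℕ) : Int)) := by
  induction m with
  | zero => simp [PySem.List.pyRange_one_eq_nil]
  | succ m ih =>
    have hm : ((m : Int) + 1) = ((m + 1 : ℕ) : Int) := by push_cast; ring
    rw [← hm, PySem.List.pyRange_one_succ_right (by positivity), List.foldl_append,
      ih (by omega)]
    have hlen : ((pvRevComp cs).length : Int) = (cs.length : Int) := by simp [pvRevComp]
    have hca : pvCA cs (o : Int) (m : Int) = pvCond cs o m := by
      rw [pvCA, pvCond]
      have hb : ((m : Int) + (o : Int)) = ((m + o : ℕ) : Int) := by push_cast; ring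
      rw [hb, hlen]
      simp only [PySem.List.pyGet?_natCast]
      have hlt : ((m + o : ℕ) : Int) < (cs.length : Int) := by exact_mod_cast (by omega : m + o < cs.length)
      rw [decide_eq_decide]
      exact and_iff_right hlt
    simp only [List.foldl_cons, List.foldl_nil, pvStep, hca]
    rw [Finset.range_add_one, Finset.sup_insert]
    by_cases hc : pvCond cs o m = true
    · simp only [hc, if_true]
      cases m with
      | zero =>
        simp only [Prod.mk.injEq, pvRun, hc, if_true]
        refine ⟨by norm_num, by norm_num⟩
      | succ m' =>
        have hrun : pvRun cs o (m' + 1) = pvRun cs o m' + 1 := by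
          simp [pvRun, hc]
        simp only [Nat.add_sub_cancel, if_neg (Nat.succ_ne_zero m'), if_neg (Nat.succ_ne_zero (m' + 1)),
          hrun]
        simp only [Prod.mk.injEq]
        refine ⟨by push_cast; ring, by push_cast; exact max_comm _ _⟩
    · simp only [hc, if_false, Bool.false_eq_true]
      have hrun : pvRun cs o m = 0 := by
        cases m <;> simp [pvRun, hc]
      simp [hrun]

-- A = sup over offsets of diagonal sups
theorem pvA_eq_sup (seq : String) :
    max_self_comp_py seq
      = ((Finset.range (seq.toList.length - 1)).sup
          (fun k => pvDiagSup seq.toList (k + 1)) : ℕ) := by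
  unfold max_self_comp_py
  have hstep : ∀ o : Int,
      (fun (st : Int × Int) i =>
        if i + o < ((pvRevComp seq.toList).length : Int) ∧
            PySem.List.pyGet? seq.toList i = PySem.List.pyGet? (pvRevComp seq.toList) (i + o) then
          (st.1 + 1, max st.2 (st.1 + 1))
        else (0, st.2)) = pvStep (pvCA seq.toList o) := by
    intro o; funext st i
    by_cases h : i + o < ((pvRevComp seq.toList).length : Int) ∧
        PySem.List.pyGet? seq.toList i = PySem.List.pyGet? (pvRevComp seq.toList) (i + o) <;>
      simp [pvStep, pvCA, h]
  simp only [hstep]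
  rw [pvOuter
    (fun o m => ((PySem.List.pyRange 0 ((seq.toList.length : Int) - o) 1).foldl
      (pvStep (pvCA seq.toList o)) (0, m)).2)
    (fun o m hm => pvStep_shift _ _ 0 m le_rfl hm) _ 0 le_rfl]
  set cs := seq.toList with hcs
  set N := cs.length with hN
  rw [PySem.List.pyRange_one 1 (N : Int)]
  have hN1 : ((N : Int) - 1).toNat = N - 1 := by omega
  rw [hN1, List.foldl_map]
  have hinner : ∀ (a : Int), ∀ k ∈ List.range (N - 1),
      max a ((PySem.List.pyRange 0 ((N : Int) - (1 + (k : Int))) 1).foldl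
          (pvStep (pvCA cs (1 + (k : Int)))) (0, 0)).2
      = max a ((pvDiagSup cs (k + 1) : ℕ) : Int) := by
    intro a k hk
    rw [List.mem_range] at hk
    have h1 : (1 + (k : Int)) = ((k + 1 : ℕ) : Int) := by push_cast; ring
    have h2 : ((N : Int) - ((k + 1 : ℕ) : Int)) = ((N - (k + 1) : ℕ) : Int) := by
      push_cast; omega
    rw [h1, h2, pvInnerA cs (k + 1) (N - (k + 1)) (by omega)]
    rfl
  rw [PySem.List.foldl_congr_mem _ _
    (fun (a : Int) (k : ℕ) => max a ((pvDiagSup cs (k + 1) : ℕ) : Int)) 0 hinner,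
    pvFoldMaxCast _ _ 0 le_rfl]
  exact max_eq_right (by positivity)

-- the body of B's outer loop, with the row index as a Nat (proof-side name)
def pvBodyB (cs : List Char) (st : List Int × Int) (k : ℕ) : List Int × Int :=
  let ch := PySem.List.pyGet? cs (k : Int)
  let dp := List.replicate ((k : Int) + 1).toNat (0 : Int) ++
    (PySem.List.pyRange ((k : Int) + 1) (cs.length : Int) 1).map
      (fun j => if ch = PySem.List.pyGet? (pvRevComp cs) j
        then PySem.List.pyGetD st.1 (j - 1) 0 + 1 else 0)
  let best := match PySem.List.max? dp (fun y => y) with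
    | some m => max st.2 m
    | none => st.2
  (dp, best)

-- what B's dp row and best hold after m rows
def pvDpSpec (cs : List Char) : ℕ → List Int
  | 0 => List.replicate cs.length (0 : Int)
  | m + 1 => List.replicate (m + 1) (0 : Int) ++
      (List.range (cs.length - (m + 1))).map (fun t => ((pvRun cs (t + 1) m : ℕ) : Int))

def pvBestSpec (cs : List Char) : ℕ → ℕ
  | 0 => 0
  | m + 1 => max (pvBestSpec cs m)
      ((Finset.range (cs.length - (m + 1))).sup (fun t => pvRun cs (t + 1) m))

theorem pvFoldMaxReplicate (m : ℕ) : ∀ b : Int, 0 ≤ b →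
    (List.replicate m (0 : Int)).foldl max b = b := by
  induction m with
  | zero => intro b _; rfl
  | succ m ih =>
    intro b hb
    rw [List.replicate_succ, List.foldl_cons, max_eq_left hb]
    exact ih b hb

-- reading B's dp row at matrix column m + t (the cell above-left of row m + 1, column m + 1 + t)
theorem pvDpSpec_get (cs : List Char) (m t : ℕ) (h : m + t < cs.length) :
    PySem.List.pyGetD (pvDpSpec cs m) ((m : Int) + (t : Int)) 0
      = if m = 0 then 0 else ((pvRun cs (t + 1) (m - 1) : ℕ) : Int) := by
  cases m with
  | zero =>
    have h0 : ((0 : ℕ) : Int) + (t : Int) = ((t : ℕ) : Int) := by push_cast; ring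
    rw [h0, PySem.List.pyGetD_natCast]
    simp [pvDpSpec, List.getD, (by omega : t < cs.length)]
  | succ m' =>
    have h0 : ((m' + 1 : ℕ) : Int) + (t : Int) = ((m' + 1 + t : ℕ) : Int) := by push_cast; ring
    rw [h0, PySem.List.pyGetD_natCast, pvDpSpec,
      List.getD_append_right _ _ _ _ (by simp only [List.length_replicate]; omega)]
    have ht : m' + 1 + t - (List.replicate (m' + 1) (0 : Int)).length = t := by simp
    rw [ht]
    simp [List.getD, (by omega : t < cs.length - (m' + 1))]

-- one outer iteration carries the dp-row spec one row forward
theorem pvRow_eq (cs : List Char) (m : ℕ) (hm : m < cs.length) :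
    (List.replicate ((m : Int) + 1).toNat (0 : Int) ++
      (PySem.List.pyRange ((m : Int) + 1) (cs.length : Int) 1).map
        (fun j => if PySem.List.pyGet? cs (m : Int) = PySem.List.pyGet? (pvRevComp cs) j
          then PySem.List.pyGetD (pvDpSpec cs m) (j - 1) 0 + 1 else 0))
      = pvDpSpec cs (m + 1) := by
  have h1 : ((m : Int) + 1).toNat = m + 1 := by omega
  have h2 : ((m : Int) + 1) = ((m + 1 : ℕ) : Int) := by push_cast; ring
  rw [h1, h2, PySem.List.pyRange_one, List.map_map]
  have h3 : (((cs.length : ℕ) : Int) - ((m + 1 : ℕ) : Int)).toNat = cs.length - (m + 1) := by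
    omega
  rw [h3, pvDpSpec]
  congr 1
  apply List.map_congr_left
  intro t ht
  rw [List.mem_range] at ht
  simp only [Function.comp_apply]
  have hj : ((m + 1 : ℕ) : Int) + (t : Int) = ((m + 1 + t : ℕ) : Int) := by push_cast; ring
  have hcond : (PySem.List.pyGet? cs (m : Int) = PySem.List.pyGet? (pvRevComp cs)
      (((m + 1 : ℕ) : Int) + (t : Int))) ↔ pvCond cs (t + 1) m = true := by
    rw [hj]
    simp only [PySem.List.pyGet?_natCast, pvCond]
    rw [decide_eq_true_iff]
    have : m + (t + 1) = m + 1 + t := by omega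
    rw [this]
  have hread : ((m + 1 : ℕ) : Int) + (t : Int) - 1 = (m : Int) + (t : Int) := by push_cast; ring
  by_cases hc : pvCond cs (t + 1) m = true
  · rw [if_pos (hcond.mpr hc), hread, pvDpSpec_get cs m t (by omega)]
    cases m with
    | zero => simp [pvRun, hc]
    | succ m' =>
      rw [if_neg (Nat.succ_ne_zero m')]
      have : pvRun cs (t + 1) (m' + 1) = pvRun cs (t + 1) m' + 1 := by simp [pvRun, hc]
      rw [this]
      push_cast
      ring
  · rw [if_neg (fun hh => hc (hcond.mp hh))]
    have : pvRun cs (t + 1) m = 0 := by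
      cases m <;> simp [pvRun, hc]
    rw [this]
    norm_num

-- B's fold invariant: after m rows the state is (dp-row spec, best-so-far spec)
theorem pvInvB (cs : List Char) (m : ℕ) (hm : m ≤ cs.length) :
    (List.range m).foldl (pvBodyB cs) (List.replicate cs.length (0 : Int), 0)
      = (pvDpSpec cs m, ((pvBestSpec cs m : ℕ) : Int)) := by
  induction m with
  | zero => rfl
  | succ m ih =>
    rw [List.range_succ, List.foldl_append, ih (by omega), List.foldl_cons, List.foldl_nil]
    show pvBodyB cs (pvDpSpec cs m, ((pvBestSpec cs m : ℕ) : Int)) m = _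
    unfold pvBodyB
    simp only
    rw [pvRow_eq cs m (by omega)]
    have hcons : pvDpSpec cs (m + 1) = 0 :: (List.replicate m (0 : Int) ++
        (List.range (cs.length - (m + 1))).map (fun t => ((pvRun cs (t + 1) m : ℕ) : Int))) := by
      rw [pvDpSpec, List.replicate_succ, List.cons_append]
    rw [hcons, PySem.List.max?_id_cons, ← hcons]
    have hmax : (List.replicate m (0 : Int) ++
        (List.range (cs.length - (m + 1))).map (fun t => ((pvRun cs (t + 1) m : ℕ) : Int))).foldl
          max 0
        = (((Finset.range (cs.length - (m + 1))).sup (fun t => pvRun cs (t + 1) m) : ℕ) : Int) := by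
      rw [List.foldl_append, pvFoldMaxReplicate m 0 le_rfl, List.foldl_map,
        pvFoldMaxCast _ _ 0 le_rfl]
      exact max_eq_right (by positivity)
    rw [hmax]
    have : max (((pvBestSpec cs m : ℕ) : Int))
        (((Finset.range (cs.length - (m + 1))).sup (fun t => pvRun cs (t + 1) m) : ℕ) : Int)
        = ((pvBestSpec cs (m + 1) : ℕ) : Int) := by
      show _ = ((max (pvBestSpec cs m) _ : ℕ) : Int)
      push_cast
      rfl
    show (pvDpSpec cs (m + 1), max ((pvBestSpec cs m : ℕ) : Int)
      ((((Finset.range (cs.length - (m + 1))).sup fun t => pvRun cs (t + 1) m : ℕ) : Int))) = _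
    rw [this]

theorem pvBestSpec_sup (cs : List Char) (m : ℕ) :
    pvBestSpec cs m = (Finset.range m).sup (pvRowSup cs) := by
  induction m with
  | zero => rfl
  | succ m ih =>
    rw [Finset.range_add_one, Finset.sup_insert, pvBestSpec, ih]
    have heq : cs.length - (m + 1) = cs.length - 1 - m := by omega
    rw [heq]
    exact max_comm _ _

-- B = sup over rows of row sups
theorem pvB_eq_sup (seq : String) :
    max_self_comp_py_alt seq
      = ((Finset.range seq.toList.length).sup (pvRowSup seq.toList) : ℕ) := by
  unfold max_self_comp_py_alt
  set cs := seq.toList with hcs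
  have hrc : cs.reverse.map (fun c => pvCompD.getD c c) = pvRevComp cs := by
    rw [pvRevComp, ← List.map_reverse]
    exact List.map_congr_left (fun c _ => pvCompD_getD c)
  simp only [hrc]
  rw [PySem.List.pyRange_zero_natCast, List.foldl_map]
  have htn : ((cs.length : Int)).toNat = cs.length := Int.toNat_natCast _
  rw [htn]
  have hfun : (fun (st : List Int × Int) (k : ℕ) =>
      (fun (st : List Int × Int) (i : Int) =>
        let ch := PySem.List.pyGet? cs i
        let dp := List.replicate (i + 1).toNat (0 : Int) ++
          (PySem.List.pyRange (i + 1) (cs.length : Int) 1).map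
            (fun j => if ch = PySem.List.pyGet? (pvRevComp cs) j
              then PySem.List.pyGetD st.1 (j - 1) 0 + 1 else 0)
        let best := match PySem.List.max? dp (fun y => y) with
          | some m => max st.2 m
          | none => st.2
        (dp, best)) st (k : Int)) = pvBodyB cs := rfl
  rw [hfun, pvInvB cs cs.length le_rfl, pvBestSpec_sup]

-- the two sups range over the same triangle: swap the iteration order
theorem pvSup_swap (cs : List Char) :
    (Finset.range (cs.length - 1)).sup (fun k => pvDiagSup cs (k + 1))
      = (Finset.range cs.length).sup (pvRowSup cs) := by
  set N := cs.length with hN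
  set g : ℕ → ℕ → ℕ := fun k i => if i + k + 2 ≤ N then pvRun cs (k + 1) i else 0 with hg
  have ext1 : ∀ k, pvDiagSup cs (k + 1) = (Finset.range (N - 1)).sup (fun i => g k i) := by
    intro k
    apply le_antisymm
    · apply Finset.sup_le
      intro i hi
      rw [Finset.mem_range] at hi
      have h2 : i + k + 2 ≤ N := by omega
      have : pvRun cs (k + 1) i = g k i := by simp [hg, h2]
      rw [this]
      exact Finset.le_sup (Finset.mem_range.mpr (by omega))
    · apply Finset.sup_le
      intro i hi
      by_cases h2 : i + k + 2 ≤ N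
      · have : g k i = pvRun cs (k + 1) i := by simp [hg, h2]
        rw [this]
        exact Finset.le_sup (Finset.mem_range.mpr (by omega))
      · have : g k i = 0 := by simp [hg, h2]
        rw [this]; exact Nat.zero_le _
  have ext2 : ∀ i, pvRowSup cs i = (Finset.range (N - 1)).sup (fun k => g k i) := by
    intro i
    apply le_antisymm
    · apply Finset.sup_le
      intro t ht
      rw [Finset.mem_range] at ht
      have h2 : i + t + 2 ≤ N := by omega
      have : pvRun cs (t + 1) i = g t i := by simp [hg, h2]
      rw [this]
      exact Finset.le_sup (f := fun k => g k i) (Finset.mem_range.mpr (by omega))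
    · apply Finset.sup_le
      intro k hk
      by_cases h2 : i + k + 2 ≤ N
      · have : g k i = pvRun cs (k + 1) i := by simp [hg, h2]
        rw [this]
        exact Finset.le_sup (f := fun t => pvRun cs (t + 1) i) (Finset.mem_range.mpr (by omega))
      · have : g k i = 0 := by simp [hg, h2]
        rw [this]; exact Nat.zero_le _
  calc (Finset.range (N - 1)).sup (fun k => pvDiagSup cs (k + 1))
      = (Finset.range (N - 1)).sup (fun k => (Finset.range (N - 1)).sup (fun i => g k i)) := by
        exact Finset.sup_congr rfl (fun k _ => ext1 k)
    _ = (Finset.range (N - 1)).sup (fun i => (Finset.range (N - 1)).sup (fun k => g k i)) := by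
        exact Finset.sup_comm _ _ _
    _ = (Finset.range (N - 1)).sup (pvRowSup cs) := by
        exact Finset.sup_congr rfl (fun i _ => (ext2 i).symm)
    _ = (Finset.range N).sup (pvRowSup cs) := by
        apply le_antisymm
        · apply Finset.sup_mono
          intro x hx
          rw [Finset.mem_range] at hx ⊢
          omega
        · apply Finset.sup_le
          intro i hi
          rw [Finset.mem_range] at hi
          by_cases h : i < N - 1
          · exact Finset.le_sup (Finset.mem_range.mpr h)
          · have h0 : cs.length - 1 - i = 0 := by omega
            have : pvRowSup cs i = 0 := by simp [pvRowSup, h0]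
            rw [this]; exact Nat.zero_le _


theorem max_self_comp_main (seq : String) :
    max_self_comp_py seq = max_self_comp_py_alt seq := by
  rw [pvA_eq_sup, pvB_eq_sup, pvSup_swap]

-- ===== VERDICT (by name: the statement is the Claim_ definition above) =====
theorem max_self_comp_py_spec : Claim_equal_max_self_comp_py := by
  intro seq _
  exact max_self_comp_main seq
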